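-- pv_equiv track=rewrite | github.com/kianwoon/jarvis | app/langchain/dynamic_agent_system.py | _determine_collaboration_pattern
-- ===== SOURCE A (Python) =====
-- def _determine_collaboration_pattern(query_lower: str, agent_count: int) -> str:
--     """Determine the best collaboration pattern for the query"""
--
--     # Sequential for complex, multi-step processes
--     if any(word in query_lower for word in ["step", "process", "workflow", "phase", "sequence"]):
--         return "sequential"
--
--     # Hierarchical for strategic/executive queries
--     if any(word in query_lower for word in ["strategy", "decision", "approve", "executive", "leadership"]):
--         return "hierarchical"
--
--     # Parallel for research/analysis queries or when multiple perspectives needed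
--     if agent_count > 2 or any(word in query_lower for word in ["analyze", "research", "compare", "evaluate"]):
--         return "parallel"
--
--     # Default to parallel for general queries
--     return "parallel"
-- ===== SOURCE B (Python) =====
-- _SEQ_KWS = ("step", "process", "workflow", "phase", "sequence")
-- _HIER_KWS = ("strategy", "decision", "approve", "executive", "leadership")
--
--
-- def _determine_collaboration_pattern(query_lower: str, agent_count: int) -> str:
--     """Single left-to-right scan over the query's positions: at each position
--     record (in two boolean accumulators) whether a sequential or hierarchical
--     keyword starts there; one pass replaces the per-category substring searches.
--     agent_count is unused: every non-early path in the original returns "parallel"."""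
--     hit_seq = False
--     hit_hier = False
--     for i in range(len(query_lower)):
--         hit_seq = hit_seq or query_lower.startswith(_SEQ_KWS, i)
--         hit_hier = hit_hier or query_lower.startswith(_HIER_KWS, i)
--     if hit_seq:
--         return "sequential"
--     if hit_hier:
--         return "hierarchical"
--     return "parallel"
-- ===== Notes on version B (the rewrite author's own statement) =====
-- stated objective: alternative
-- what changed: Replaced the per-category any-substring-in-query cascade by a single left-to-right scan over the query's positions that accumulates two booleans (a sequential/hierarchical keyword starts here), dropping the dead agent_count>2 branch since both it and the default return 'parallel'.
import Mathlib
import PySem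

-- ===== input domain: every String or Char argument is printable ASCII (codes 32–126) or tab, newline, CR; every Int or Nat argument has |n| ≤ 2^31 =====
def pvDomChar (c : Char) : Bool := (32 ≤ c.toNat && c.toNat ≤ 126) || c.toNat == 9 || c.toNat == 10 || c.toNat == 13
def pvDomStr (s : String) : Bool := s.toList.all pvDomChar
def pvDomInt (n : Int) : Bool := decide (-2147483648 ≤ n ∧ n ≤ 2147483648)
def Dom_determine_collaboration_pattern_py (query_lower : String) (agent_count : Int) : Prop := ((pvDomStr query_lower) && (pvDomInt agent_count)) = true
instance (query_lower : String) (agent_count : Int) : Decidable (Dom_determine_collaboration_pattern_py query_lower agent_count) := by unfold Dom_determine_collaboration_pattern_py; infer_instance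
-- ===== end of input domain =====

-- B: instead of per-category substring searches, one left-to-right pass over the query's positions accumulating two booleans (keyword-starts-here); the dead agent_count>2 branch is dropped since both it and the default return "parallel"; objective: alternative.


-- ===== PORT A =====
def determine_collaboration_pattern_py (query_lower : String) (agent_count : Int) : String :=
  if ["step", "process", "workflow", "phase", "sequence"].any
      (fun w => PySem.Str.isIn w query_lower) then "sequential"
  else if ["strategy", "decision", "approve", "executive", "leadership"].any
      (fun w => PySem.Str.isIn w query_lower) then "hierarchical"
  else if agent_count > 2 || ["analyze", "research", "compare", "evaluate"].any
      (fun w => PySem.Str.isIn w query_lower) then "parallel"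
  else "parallel"

-- ===== PORT B =====
-- B: one pass over the query's positions, two boolean accumulators; agent_count unused
-- (every non-early path of A returns "parallel").
def pvSeqKws : List String := ["step", "process", "workflow", "phase", "sequence"]
def pvHierKws : List String := ["strategy", "decision", "approve", "executive", "leadership"]

-- Python str.startswith(tuple, i): some keyword is a prefix of the suffix at i (0 ≤ i < len here).
def pvStartsAny (kws : List String) (chars : List Char) (i : Nat) : Bool :=
  kws.any (fun kw => kw.toList.isPrefixOf (chars.drop i))

def determine_collaboration_pattern_py_alt (query_lower : String) (agent_count : Int) : String :=
  let chars := query_lower.toList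
  let res := (List.range chars.length).foldl
    (fun (acc : Bool × Bool) i =>
      (acc.1 || pvStartsAny pvSeqKws chars i, acc.2 || pvStartsAny pvHierKws chars i))
    (false, false)
  if res.1 then "sequential"
  else if res.2 then "hierarchical"
  else "parallel"

-- ===== PRECONDITION & SPEC =====
def Spec_determine_collaboration_pattern_py (query_lower : String) (agent_count : Int) (out : String) : Prop := out = determine_collaboration_pattern_py_alt query_lower agent_count
instance (query_lower : String) (agent_count : Int) (out : String) : Decidable (Spec_determine_collaboration_pattern_py query_lower agent_count out) := by unfold Spec_determine_collaboration_pattern_py; infer_instance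

-- ===== CLAIM (what is proved, stated in full; the proofs are below) =====
def Claim_equal_determine_collaboration_pattern_py : Prop := ∀ (query_lower : String) (agent_count : Int), Dom_determine_collaboration_pattern_py query_lower agent_count → Spec_determine_collaboration_pattern_py query_lower agent_count (determine_collaboration_pattern_py query_lower agent_count)

-- ===== LEMMAS AND PROOFS =====

-- The pair-of-ors fold is componentwise List.any.
theorem pv_foldl_or_pair (p q : Nat → Bool) (l : List Nat) (b1 b2 : Bool) :
    l.foldl (fun (acc : Bool × Bool) i => (acc.1 || p i, acc.2 || q i)) (b1, b2)
      = (b1 || l.any p, b2 || l.any q) := by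
  induction l generalizing b1 b2 with
  | nil => simp
  | cons x xs ih => simp [List.foldl_cons, ih, Bool.or_assoc]

-- A nonempty pattern is a prefix of some suffix with cut point < length iff it is a substring.
theorem pv_any_range_prefix (sub s : List Char) (h : sub ≠ []) :
    (List.range s.length).any (fun i => sub.isPrefixOf (s.drop i)) = PySem.Chars.isIn sub s := by
  rw [Bool.eq_iff_iff]
  rw [← PySem.Chars.exists_prefix_drop_iff_isIn]
  simp only [List.any_eq_true, List.mem_range, List.isPrefixOf_iff_prefix]
  constructor
  · rintro ⟨i, _, hp⟩; exact ⟨i, hp⟩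
  · rintro ⟨j, hp⟩
    by_cases hj : j < s.length
    · exact ⟨j, hj, hp⟩
    · exfalso
      have : s.drop j = [] := List.drop_eq_nil_of_le (Nat.le_of_not_lt hj)
      rw [this] at hp
      exact h (List.prefix_nil.mp hp)

-- Scanning all positions for any keyword of the list equals the any-keyword-substring test.
theorem pv_scan_eq_any_isIn (kws : List String) (q : String) (h : ∀ w ∈ kws, w.toList ≠ []) :
    (List.range q.toList.length).any (fun i => pvStartsAny kws q.toList i)
      = kws.any (fun w => PySem.Str.isIn w q) := by
  rw [Bool.eq_iff_iff]
  simp only [pvStartsAny, List.any_eq_true, List.mem_range]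
  constructor
  · rintro ⟨i, hi, w, hw, hp⟩
    refine ⟨w, hw, ?_⟩
    rw [PySem.Str.isIn, ← pv_any_range_prefix _ _ (h w hw)]
    exact List.any_eq_true.mpr ⟨i, List.mem_range.mpr hi, hp⟩
  · rintro ⟨w, hw, hin⟩
    rw [PySem.Str.isIn, ← pv_any_range_prefix _ _ (h w hw)] at hin
    obtain ⟨i, hi, hp⟩ := List.any_eq_true.mp hin
    exact ⟨i, List.mem_range.mp hi, w, hw, hp⟩

-- ===== VERDICT (by name: the statement is the Claim_ definition above) =====
theorem determine_collaboration_pattern_py_spec : Claim_equal_determine_collaboration_pattern_py := by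
  intro q n _
  unfold Spec_determine_collaboration_pattern_py determine_collaboration_pattern_py
  simp only [determine_collaboration_pattern_py_alt]
  rw [pv_foldl_or_pair, Bool.false_or, Bool.false_or,
      pv_scan_eq_any_isIn pvSeqKws q (by decide),
      pv_scan_eq_any_isIn pvHierKws q (by decide)]
  unfold pvSeqKws pvHierKws
  split_ifs <;> rfl
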